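-- pv_equiv track=rewrite | github.com/keroros/config | script/csd_bak.py | generate_verilog
-- ===== SOURCE A (Python) =====
-- def binary_to_csd(binary_str):
--     binary_list = list(map(int, list(binary_str)))  # 将二进制字符串转换为整数列表
--     n = len(binary_list)
--     i = 0
--     csd_list = []
--
--     while i < n:
--         if i + 2 < n and binary_list[i] == 1 and binary_list[i+1] == 1 and binary_list[i+2] == 1:
--             # 如果连续出现三个或以上的1，转换为100...0-1
--             # 统计连续1的个数
--             count = 0
--             while i + count < n and binary_list[i + count] == 1:
--                 count += 1
--             # 覆盖前面的位
--             if len(csd_list) >= 1: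
--                 csd_list[-1] = 1  # 覆盖前一个位
--             else:
--                 csd_list.append(1)  # 如果列表为空，直接添加1
--             # 添加中间的0
--             csd_list.extend([0] * (count - 1))  # 添加 count - 1 个0
--             csd_list.append(-1)  # 添加-1
--             i += count  # 跳过已处理的连续1
--         else:
--             # 否则直接添加到CSD列表
--             csd_list.append(binary_list[i])
--             i += 1
--
--     return csd_list
--
-- def generate_verilog(binary_str, input_var, output_var, input_width, output_width):
--     # 去除输入中的下划线（如果有）
--     binary_str = binary_str.replace("_", "")
--     # 转换为CSD码
--     csd_list = binary_to_csd(binary_str)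
--     n = len(csd_list)
--     verilog_terms = []
--
--     # 遍历CSD码，生成Verilog项
--     for i in range(n):
--         if csd_list[i] == 1:
--             shift = n - i - 1
--             if shift == 0:
--                 verilog_terms.append(f"+{{{input_var}}}")
--             else:
--                 # 计算需要添加的符号位数
--                 total_bits = input_width + shift
--                 sign_bits = output_width - total_bits
--                 if sign_bits > 0:
--                     verilog_terms.append(f"+{{{{{sign_bits}{{{input_var}[{input_width-1}]}}}}, {input_var}, {shift}'b0}}")
--                 else:
--                     verilog_terms.append(f"+{{{input_var}, {shift}'b0}}")
--         elif csd_list[i] == -1: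
--             shift = n - i - 1
--             if shift == 0:
--                 verilog_terms.append(f"-{{{input_var}}}")
--             else:
--                 # 计算需要添加的符号位数
--                 total_bits = input_width + shift
--                 sign_bits = output_width - total_bits
--                 if sign_bits > 0:
--                     verilog_terms.append(f"-{{{{{sign_bits}{{{input_var}[{input_width-1}]}}}}, {input_var}, {shift}'b0}}")
--                 else:
--                     verilog_terms.append(f"-{{{input_var}, {shift}'b0}}")
--
--     # 生成Verilog的assign语句
--     verilog_code = f"assign {output_var} = " + " ".join(verilog_terms) + ";"
--     # 去掉第一个项前面的加号（如果存在）
--     if verilog_code.startswith(f"assign {output_var} = +"):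
--         verilog_code = verilog_code.replace(f"assign {output_var} = +", f"assign {output_var} = ", 1)
--     return verilog_code
-- ===== SOURCE B (Python) =====
-- def generate_verilog(binary_str, input_var, output_var, input_width, output_width):
--     digits = [int(c) for c in binary_str.replace("_", "")]
--     # run-length grouping pass
--     groups = []
--     for v in digits:
--         if groups and groups[-1][0] == v:
--             groups[-1] = (v, groups[-1][1] + 1)
--         else:
--             groups.append((v, 1))
--     # emit CSD per group
--     csd = []
--     for v, length in groups:
--         if v == 1 and length >= 3:
--             if csd:
--                 csd[-1] = 1
--             else:
--                 csd.append(1)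
--             csd.extend([0] * (length - 1))
--             csd.append(-1)
--         else:
--             csd.extend([v] * length)
--     # build signed terms in one pass
--     n = len(csd)
--     terms = []
--     for i, d in enumerate(csd):
--         if d != 1 and d != -1:
--             continue
--         sign = "+" if d == 1 else "-"
--         shift = n - i - 1
--         if shift == 0:
--             body = "{" + input_var + "}"
--         else:
--             sign_bits = output_width - (input_width + shift)
--             if sign_bits > 0:
--                 body = ("{{" + str(sign_bits) + "{" + input_var + "[" + str(input_width - 1)
--                         + "]}}, " + input_var + ", " + str(shift) + "'b0}")
--             else:
--                 body = "{" + input_var + ", " + str(shift) + "'b0}"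
--         terms.append(sign + body)
--     if terms and terms[0].startswith("+"):
--         terms[0] = terms[0][1:]
--     return "assign " + output_var + " = " + " ".join(terms) + ";"
-- ===== Notes on version B (the rewrite author's own statement) =====
-- stated objective: alternative
-- what changed: binary_to_csd's index-walking loop with triple lookahead and an inner 1-counting while is replaced by a run-length-grouping pass followed by a per-group CSD emitter, and the term loop builds signed terms in one enumerate pass and strips the leading '+' from the first term instead of post-editing the assembled statement with startswith/replace.
import Mathlib
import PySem

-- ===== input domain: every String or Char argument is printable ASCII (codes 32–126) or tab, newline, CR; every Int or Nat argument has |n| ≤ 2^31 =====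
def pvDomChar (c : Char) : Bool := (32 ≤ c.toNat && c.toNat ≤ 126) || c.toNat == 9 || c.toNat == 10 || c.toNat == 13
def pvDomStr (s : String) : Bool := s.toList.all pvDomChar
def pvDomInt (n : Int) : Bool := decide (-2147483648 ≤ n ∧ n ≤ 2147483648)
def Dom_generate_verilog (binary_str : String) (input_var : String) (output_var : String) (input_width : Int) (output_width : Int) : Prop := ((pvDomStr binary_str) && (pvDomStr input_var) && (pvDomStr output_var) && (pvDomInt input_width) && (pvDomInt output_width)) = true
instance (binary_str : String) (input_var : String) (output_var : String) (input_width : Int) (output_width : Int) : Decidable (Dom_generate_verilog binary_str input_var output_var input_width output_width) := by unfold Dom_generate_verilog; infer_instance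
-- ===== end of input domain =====

-- B replaces A's index-walking triple-lookahead CSD loop by a run-length grouping pass plus a
-- per-group emitter, and builds signed terms in one pass, stripping the first term's '+'
-- instead of post-editing the assembled statement (objective: alternative decomposition).

-- ===== PORT A =====

-- int(c) for one character; Pre_ guarantees a decimal digit, so the getD fallback is never used
def pvDigit (c : Char) : Int := (PySem.Int.ofStr? (String.ofList [c])).getD 0

-- the inner 'while i + count < n and binary_list[i + count] == 1: count += 1' on the suffix from i
def pvCountOnes : List Int → Nat
  | [] => 0
  | a :: t => if a = 1 then pvCountOnes t + 1 else 0

-- f"+{{{input_var}}}" etc. (the '+' branch of A's term loop, f-strings as char lists)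
def pvPlusTermA (iv : List Char) (iw ow shift : Int) : List Char :=
  if shift = 0 then ['+', '{'] ++ iv ++ ['}']
  else
    let total_bits := iw + shift
    let sign_bits := ow - total_bits
    if sign_bits > 0 then
      ['+', '{', '{'] ++ PySem.Int.toChars sign_bits ++ ['{'] ++ iv ++ ['['] ++
        PySem.Int.toChars (iw - 1) ++ [']', '}', '}', ',', ' '] ++ iv ++ [',', ' '] ++
        PySem.Int.toChars shift ++ ['\'', 'b', '0', '}']
    else ['+', '{'] ++ iv ++ [',', ' '] ++ PySem.Int.toChars shift ++ ['\'', 'b', '0', '}']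

-- the '-' branch of A's term loop
def pvMinusTermA (iv : List Char) (iw ow shift : Int) : List Char :=
  if shift = 0 then ['-', '{'] ++ iv ++ ['}']
  else
    let total_bits := iw + shift
    let sign_bits := ow - total_bits
    if sign_bits > 0 then
      ['-', '{', '{'] ++ PySem.Int.toChars sign_bits ++ ['{'] ++ iv ++ ['['] ++
        PySem.Int.toChars (iw - 1) ++ [']', '}', '}', ',', ' '] ++ iv ++ [',', ' '] ++
        PySem.Int.toChars shift ++ ['\'', 'b', '0', '}']
    else ['-', '{'] ++ iv ++ [',', ' '] ++ PySem.Int.toChars shift ++ ['\'', 'b', '0', '}']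

-- A's main while loop: the remaining suffix binary_list[i:] is the first argument
def pvCsdA : List Int → List Int → List Int
  | [], csd => csd
  | [a], csd => pvCsdA [] (csd ++ [a])
  | [a, b], csd => pvCsdA [b] (csd ++ [a])
  | a :: b :: c :: t, csd =>
    if h : a = 1 ∧ b = 1 ∧ c = 1 then
      let count := pvCountOnes (a :: b :: c :: t)
      pvCsdA ((a :: b :: c :: t).drop count)
        ((if 1 ≤ csd.length then csd.dropLast ++ [1] else [1]) ++
          List.replicate (count - 1) 0 ++ [-1])
    else pvCsdA (b :: c :: t) (csd ++ [a])
  termination_by l _ => l.length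
  decreasing_by
  · simp
  · simp
  · simp only [pvCountOnes, h.1, h.2.1, h.2.2, if_true, List.drop_succ_cons,
      List.length_cons, List.length_drop]
    omega
  · simp

-- str.replace(old, new, 1): replace the first occurrence only — hand port, exact
def pvReplaceOnce (s old new : List Char) : List Char :=
  let k := PySem.Chars.find s old
  if k = -1 then s else s.take k.toNat ++ new ++ s.drop (k.toNat + old.length)

def generate_verilog (binary_str : String) (input_var : String) (output_var : String) (input_width : Int) (output_width : Int) : String :=
  let bs := PySem.Str.replace binary_str "_" ""
  let csd := pvCsdA (bs.toList.map pvDigit) []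
  let n : Int := csd.length
  let terms := (PySem.List.pyRange 0 n 1).foldl (fun ts i =>
      let d := PySem.List.pyGetD csd i 0
      if d = 1 then ts ++ [pvPlusTermA input_var.toList input_width output_width (n - i - 1)]
      else if d = -1 then ts ++ [pvMinusTermA input_var.toList input_width output_width (n - i - 1)]
      else ts) []
  let code := "assign ".toList ++ output_var.toList ++ " = ".toList ++ PySem.Chars.join [' '] terms ++ [';']
  let pref := "assign ".toList ++ output_var.toList ++ " = +".toList
  if PySem.Chars.startswith code pref then
    String.ofList (pvReplaceOnce code pref ("assign ".toList ++ output_var.toList ++ " = ".toList))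
  else String.ofList code

-- ===== PORT B =====

-- one step of B's run-length grouping pass (append, or merge with the last group)
def pvAddGroup (gs : List (Int × Nat)) (v : Int) : List (Int × Nat) :=
  match gs.getLast? with
  | some (w, c) => if w = v then gs.dropLast ++ [(v, c + 1)] else gs ++ [(v, 1)]
  | none => [(v, 1)]

-- B's per-group CSD emitter
def pvEmitGroup (csd : List Int) (g : Int × Nat) : List Int :=
  if g.1 = 1 ∧ 3 ≤ g.2 then
    (if csd = [] then [1] else csd.dropLast ++ [1]) ++ List.replicate (g.2 - 1) 0 ++ [-1]
  else csd ++ List.replicate g.2 g.1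

-- the unsigned body of a term in B
def pvBodyB (iv : List Char) (iw ow shift : Int) : List Char :=
  if shift = 0 then ['{'] ++ iv ++ ['}']
  else
    let sign_bits := ow - (iw + shift)
    if sign_bits > 0 then
      ['{', '{'] ++ PySem.Int.toChars sign_bits ++ ['{'] ++ iv ++ ['['] ++
        PySem.Int.toChars (iw - 1) ++ [']', '}', '}', ',', ' '] ++ iv ++ [',', ' '] ++
        PySem.Int.toChars shift ++ ['\'', 'b', '0', '}']
    else ['{'] ++ iv ++ [',', ' '] ++ PySem.Int.toChars shift ++ ['\'', 'b', '0', '}']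

def generate_verilog_alt (binary_str : String) (input_var : String) (output_var : String) (input_width : Int) (output_width : Int) : String :=
  let digits := (PySem.Str.replace binary_str "_" "").toList.map pvDigit
  let groups := digits.foldl pvAddGroup []
  let csd := groups.foldl pvEmitGroup []
  let terms := (PySem.List.enumerate csd 0).foldl (fun ts p =>
      if p.2 ≠ 1 ∧ p.2 ≠ -1 then ts
      else ts ++ [(if p.2 = 1 then ['+'] else ['-']) ++
        pvBodyB input_var.toList input_width output_width ((csd.length : Int) - p.1 - 1)]) []
  -- terms[0] = terms[0][1:] when it starts with '+' (s[1:] on a string = drop 1, exact)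
  let terms' := match terms with
    | [] => ([] : List (List Char))
    | t :: rest => if PySem.Chars.startswith t ['+'] then t.drop 1 :: rest else t :: rest
  String.ofList ("assign ".toList ++ output_var.toList ++ " = ".toList ++
    PySem.Chars.join [' '] terms' ++ [';'])

-- ===== PRECONDITION & SPEC =====
-- A raises ValueError (int(c)) iff some character other than '_' is not a decimal digit; Pre_ excludes exactly those.
def Pre_generate_verilog (binary_str : String) (input_var : String) (output_var : String) (input_width : Int) (output_width : Int) : Prop :=
  (binary_str.toList.all (fun c => c == '_' || ('0' ≤ c && c ≤ '9'))) = true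
instance (binary_str : String) (input_var : String) (output_var : String) (input_width : Int) (output_width : Int) : Decidable (Pre_generate_verilog binary_str input_var output_var input_width output_width) := by unfold Pre_generate_verilog; infer_instance

def pvWitness_generate_verilog : String × String × String × Int × Int := ("1110_1", "a", "y", 4, 10)

def Spec_generate_verilog (binary_str : String) (input_var : String) (output_var : String) (input_width : Int) (output_width : Int) (out : String) : Prop := out = generate_verilog_alt binary_str input_var output_var input_width output_width
instance (binary_str : String) (input_var : String) (output_var : String) (input_width : Int) (output_width : Int) (out : String) : Decidable (Spec_generate_verilog binary_str input_var output_var input_width output_width out) := by unfold Spec_generate_verilog; infer_instance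

-- ===== CLAIM (what is proved, stated in full; the proofs are below) =====
def Claim_equal_generate_verilog : Prop := ∀ (binary_str : String) (input_var : String) (output_var : String) (input_width : Int) (output_width : Int), Dom_generate_verilog binary_str input_var output_var input_width output_width → Pre_generate_verilog binary_str input_var output_var input_width output_width → Spec_generate_verilog binary_str input_var output_var input_width output_width (generate_verilog binary_str input_var output_var input_width output_width)

-- ===== LEMMAS AND PROOFS =====

-- run-length encoding, cons-structurally (proof-side characterisation of B's grouping pass)
def pvRleStep (v : Int) (gs : List (Int × Nat)) : List (Int × Nat) :=
  match gs with
  | (w, c) :: rest => if w = v then (v, c + 1) :: rest else (v, 1) :: (w, c) :: rest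
  | [] => [(v, 1)]

def pvRle (l : List Int) : List (Int × Nat) := l.foldr pvRleStep []

def pvBump (c : Nat) : List (Int × Nat) → List (Int × Nat)
  | (w, d) :: gs => (w, d + c) :: gs
  | [] => []

-- length of the longest prefix of l all of whose elements are a
def pvLead (a : Int) : List Int → Nat
  | [] => 0
  | b :: t => if b = a then pvLead a t + 1 else 0

theorem pvRleStep_shape (v : Int) (gs : List (Int × Nat)) :
    ∃ k rest, pvRleStep v gs = (v, k) :: rest ∧ 1 ≤ k := by
  match gs with
  | [] => exact ⟨1, [], rfl, le_refl 1⟩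
  | (w, c) :: rest =>
    by_cases h : w = v
    · exact ⟨c + 1, rest, by simp [pvRleStep, h], by omega⟩
    · exact ⟨1, (w, c) :: rest, by simp [pvRleStep, h], le_refl 1⟩

theorem pvRle_shape (a : Int) (t : List Int) :
    ∃ k rest, pvRle (a :: t) = (a, k) :: rest ∧ 1 ≤ k := by
  simpa [pvRle] using pvRleStep_shape a (pvRle t)

theorem pvBump_zero (gs : List (Int × Nat)) : pvBump 0 gs = gs := by
  match gs with
  | [] => rfl
  | (w, d) :: rest => simp [pvBump]

theorem pvAddGroup_single (w : Int) (c : Nat) (v : Int) :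
    pvAddGroup [(w, c)] v = if w = v then [(v, c + 1)] else [(w, c), (v, 1)] := by
  simp [pvAddGroup]

theorem pvAddGroup_concat (gs : List (Int × Nat)) (w : Int) (c : Nat) (v : Int) :
    pvAddGroup (gs ++ [(w, c)]) v = gs ++ pvAddGroup [(w, c)] v := by
  unfold pvAddGroup
  simp only [List.getLast?_concat, List.dropLast_concat]
  by_cases h : w = v <;> simp [h]

theorem foldl_addGroup_prefix (l : List Int) (gs h : List (Int × Nat)) (hne : h ≠ []) :
    l.foldl pvAddGroup (gs ++ h) = gs ++ l.foldl pvAddGroup h := by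
  induction l generalizing h with
  | nil => simp
  | cons v t ih =>
    obtain ⟨h', x, rfl⟩ := List.eq_nil_or_concat h |>.resolve_left hne
    obtain ⟨w, c⟩ := x
    simp only [List.foldl_cons, List.concat_eq_append]
    rw [← List.append_assoc, pvAddGroup_concat, pvAddGroup_concat, List.append_assoc,
      ih _ (by by_cases hwv : w = v <;> simp [pvAddGroup_single, hwv])]

theorem foldl_addGroup_bump (l : List Int) (v : Int) (c : Nat) :
    l.foldl pvAddGroup [(v, c + 1)] = pvBump c (pvRle (v :: l)) := by
  induction l generalizing v c with
  | nil => simp [pvRle, pvRleStep, pvBump, Nat.add_comm]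
  | cons h t ih =>
    by_cases hv : v = h
    · subst hv
      obtain ⟨k, rest, hsh, hk⟩ := pvRle_shape v t
      have l1 : List.foldl pvAddGroup [(v, c + 1)] (v :: t)
          = List.foldl pvAddGroup [(v, (c + 1) + 1)] t := by
        simp [List.foldl_cons, pvAddGroup_single]
      rw [l1, ih]
      have : pvRle (v :: v :: t) = (v, k + 1) :: rest := by
        simp only [pvRle, List.foldr_cons] at hsh ⊢
        rw [hsh]; simp [pvRleStep]
      rw [this, hsh]
      simp [pvBump]
      omega
    · obtain ⟨k, rest, hsh, hk⟩ := pvRle_shape h t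
      have l1 : List.foldl pvAddGroup [(v, c + 1)] (h :: t)
          = List.foldl pvAddGroup ([(v, c + 1)] ++ [(h, 1)]) t := by
        simp [List.foldl_cons, pvAddGroup_single, hv]
      rw [l1, foldl_addGroup_prefix t [(v, c + 1)] [(h, 1)] (by simp)]
      have l2 : List.foldl pvAddGroup [(h, 1)] t = pvRle (h :: t) := by
        have := ih h 0
        rwa [pvBump_zero] at this
      rw [l2]
      have : pvRle (v :: h :: t) = (v, 1) :: pvRle (h :: t) := by
        simp only [pvRle, List.foldr_cons] at hsh ⊢
        rw [hsh]; simp [pvRleStep, Ne.symm hv]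
      rw [this]
      simp [pvBump, Nat.add_comm]

theorem foldl_addGroup_eq_rle (l : List Int) : l.foldl pvAddGroup [] = pvRle l := by
  cases l with
  | nil => rfl
  | cons v t =>
    have h0 : pvAddGroup [] v = [(v, 0 + 1)] := by simp [pvAddGroup]
    simp only [List.foldl_cons, h0, foldl_addGroup_bump, pvBump_zero]

theorem pvCountOnes_eq_lead (l : List Int) : pvCountOnes l = pvLead 1 l := by
  induction l with
  | nil => rfl
  | cons a t ih => simp [pvCountOnes, pvLead, ih]

theorem pvLead_take_drop (l : List Int) (a : Int) :
    l = List.replicate (pvLead a l) a ++ l.drop (pvLead a l) := by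
  induction l with
  | nil => rfl
  | cons b t ih =>
    by_cases h : b = a
    · subst h
      simp only [pvLead, if_pos rfl, List.replicate_succ, List.drop_succ_cons, List.cons_append]
      exact congrArg (b :: ·) ih
    · simp [pvLead, h]

theorem pvLead_drop_head (l : List Int) (a h : Int) (t' : List Int)
    (hd : l.drop (pvLead a l) = h :: t') : h ≠ a := by
  induction l generalizing t' with
  | nil => simp [pvLead] at hd
  | cons b t ih =>
    by_cases hb : b = a
    · subst hb
      simp only [pvLead, if_pos rfl, List.drop_succ_cons] at hd
      exact ih _ hd
    · simp only [pvLead, if_neg hb, List.drop_zero] at hd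
      cases hd; exact hb

theorem pvRle_decomp (t : List Int) (a : Int) :
    pvRle (a :: t) = (a, pvLead a (a :: t)) :: pvRle ((a :: t).drop (pvLead a (a :: t))) := by
  induction t generalizing a with
  | nil => simp [pvRle, pvRleStep, pvLead]
  | cons b t' ih =>
    by_cases h : b = a
    · subst h
      have hrec := ih b
      have : pvRle (b :: b :: t') = pvRleStep b (pvRle (b :: t')) := by simp [pvRle]
      rw [this, hrec]
      simp only [pvRleStep, if_pos rfl]
      have hl : pvLead b (b :: b :: t') = pvLead b (b :: t') + 1 := by simp [pvLead]
      rw [hl]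
      have hlt : pvLead b (b :: t') = pvLead b t' + 1 := by simp [pvLead]
      simp [hlt, List.drop_succ_cons]
    · obtain ⟨k, rest, hsh, hk⟩ := pvRle_shape b t'
      have : pvRle (a :: b :: t') = pvRleStep a (pvRle (b :: t')) := by simp [pvRle]
      rw [this, hsh]
      simp only [pvRleStep, if_neg (fun hc : b = a => h hc)]
      have hl : pvLead a (a :: b :: t') = 1 := by simp [pvLead, h]
      rw [hl, ← hsh]
      simp

theorem pvCsdA_step (a : Int) (m csd : List Int)
    (hg : ∀ b c t, m = b :: c :: t → ¬(a = 1 ∧ b = 1 ∧ c = 1)) :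
    pvCsdA (a :: m) csd = pvCsdA m (csd ++ [a]) := by
  match m with
  | [] => simp [pvCsdA]
  | [b] => simp [pvCsdA]
  | b :: c :: t => rw [pvCsdA]; rw [dif_neg (hg b c t rfl)]

theorem pvCsdA_run_ne_one (k : Nat) (a : Int) (rest csd : List Int) (ha : a ≠ 1) :
    pvCsdA (List.replicate k a ++ rest) csd = pvCsdA rest (csd ++ List.replicate k a) := by
  induction k generalizing csd with
  | zero => simp
  | succ k ih =>
    rw [List.replicate_succ, List.cons_append,
      pvCsdA_step a _ csd (fun b c t _ hc => ha hc.1), ih]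
    simp [List.replicate_succ']

theorem pvCsdA_run_one_small (k : Nat) (rest csd : List Int) (hk : 1 ≤ k) (hk2 : k ≤ 2)
    (hrest : rest = [] ∨ ∃ h t', rest = h :: t' ∧ h ≠ 1) :
    pvCsdA (List.replicate k 1 ++ rest) csd = pvCsdA rest (csd ++ List.replicate k 1) := by
  have hstep1 : ∀ csd', pvCsdA ((1 : Int) :: rest) csd' = pvCsdA rest (csd' ++ [1]) := by
    intro csd'
    refine pvCsdA_step 1 rest csd' (fun b c t hm => ?_)
    rcases hrest with h | ⟨h, t', hr, hne⟩
    · simp [h] at hm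
    · rw [hr] at hm
      cases hm
      exact fun hc => hne hc.2.1
  interval_cases k
  · simpa using hstep1 csd
  · have hstep0 : pvCsdA ((1 : Int) :: (1 : Int) :: rest) csd
        = pvCsdA ((1 : Int) :: rest) (csd ++ [1]) := by
      refine pvCsdA_step 1 _ csd (fun b c t hm => ?_)
      cases hm
      rcases hrest with hnil2 | ⟨h, t', hr, hne⟩
      · simp at hnil2
      · cases hr
        exact fun hc => hne hc.2.2
    rw [show (List.replicate 2 (1 : Int) ++ rest) = (1 : Int) :: (1 : Int) :: rest by rfl,
      hstep0, hstep1]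
    simp [List.replicate]

theorem csdA_eq_emit (l csd : List Int) :
    pvCsdA l csd = (pvRle l).foldl pvEmitGroup csd := by
  match l with
  | [] => simp [pvCsdA, pvRle]
  | a :: t =>
    have hk1 : 1 ≤ pvLead a (a :: t) := by simp [pvLead]
    rw [pvRle_decomp t a]
    simp only [List.foldl_cons]
    by_cases hg : a = 1 ∧ 3 ≤ pvLead 1 (a :: t)
    · obtain ⟨ha, h3⟩ := hg
      subst ha
      -- the guard of A holds: the list starts with three ones
      obtain ⟨t3, rfl⟩ : ∃ t3, t = (1 : Int) :: 1 :: t3 := by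
        match t with
        | [] => simp [pvLead] at h3
        | [b] => by_cases hb : b = (1 : Int) <;> simp [pvLead, hb] at h3
        | b :: c :: t3 =>
          by_cases hb : b = (1 : Int)
          · by_cases hc : c = (1 : Int)
            · exact ⟨t3, by rw [hb, hc]⟩
            · simp [pvLead, hb, hc] at h3
          · simp [pvLead, hb] at h3
      rw [pvCsdA, dif_pos ⟨rfl, rfl, rfl⟩, pvCountOnes_eq_lead, csdA_eq_emit _ _]
      congr 1
      cases csd with
      | nil => simp [pvEmitGroup, h3]
      | cons x xs => simp [pvEmitGroup, h3]
    · have hemit : pvEmitGroup csd (a, pvLead a (a :: t)) = csd ++ List.replicate (pvLead a (a :: t)) a := by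
        rw [pvEmitGroup, if_neg]
        rintro ⟨h1, h2⟩
        dsimp only at h1 h2
        subst h1
        exact hg ⟨rfl, h2⟩
      rw [hemit]
      have hsplit := pvLead_take_drop (a :: t) a
      have hrest : (a :: t).drop (pvLead a (a :: t)) = []
          ∨ ∃ h t', (a :: t).drop (pvLead a (a :: t)) = h :: t' ∧ h ≠ a := by
        cases hd : (a :: t).drop (pvLead a (a :: t)) with
        | nil => exact Or.inl rfl
        | cons h t' => exact Or.inr ⟨h, t', rfl, pvLead_drop_head _ _ _ _ hd⟩
      have hlen : ((a :: t).drop (pvLead a (a :: t))).length < (a :: t).length := by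
        simp only [List.length_drop, List.length_cons]
        omega
      by_cases ha : a = 1
      · subst ha
        have hle2 : pvLead 1 ((1 : Int) :: t) ≤ 2 := by
          by_contra hgt
          exact hg ⟨rfl, by omega⟩
        rw [(by rw [← hsplit] : pvCsdA ((1 : Int) :: t) csd
            = pvCsdA (List.replicate (pvLead 1 ((1 : Int) :: t)) 1 ++ ((1 : Int) :: t).drop (pvLead 1 ((1 : Int) :: t))) csd),
          pvCsdA_run_one_small _ _ _ hk1 hle2 (by exact hrest),
          csdA_eq_emit _ _]
      · rw [(by rw [← hsplit] : pvCsdA (a :: t) csd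
            = pvCsdA (List.replicate (pvLead a (a :: t)) a ++ (a :: t).drop (pvLead a (a :: t))) csd),
          pvCsdA_run_ne_one _ _ _ _ ha,
          csdA_eq_emit _ _]
  termination_by l.length
  decreasing_by
  · have ht : t = 1 :: 1 :: t3 := by assumption
    subst ht
    simp only [List.length_drop, List.length_cons]
    omega
  · exact hlen
  · exact hlen

theorem pvPlusTermA_eq (iv : List Char) (iw ow sh : Int) :
    pvPlusTermA iv iw ow sh = ['+'] ++ pvBodyB iv iw ow sh := by
  by_cases h0 : sh = 0 <;> by_cases h1 : iw + sh < ow <;>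
    simp [pvPlusTermA, pvBodyB, h0, h1]

theorem pvMinusTermA_eq (iv : List Char) (iw ow sh : Int) :
    pvMinusTermA iv iw ow sh = ['-'] ++ pvBodyB iv iw ow sh := by
  by_cases h0 : sh = 0 <;> by_cases h1 : iw + sh < ow <;>
    simp [pvMinusTermA, pvBodyB, h0, h1]

theorem terms_eq (csd : List Int) (iv : List Char) (iw ow : Int) :
    (PySem.List.pyRange 0 (csd.length : Int) 1).foldl (fun ts i =>
      let d := PySem.List.pyGetD csd i 0
      if d = 1 then ts ++ [pvPlusTermA iv iw ow ((csd.length : Int) - i - 1)]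
      else if d = -1 then ts ++ [pvMinusTermA iv iw ow ((csd.length : Int) - i - 1)]
      else ts) []
    = (PySem.List.enumerate csd 0).foldl (fun ts p =>
      if p.2 ≠ 1 ∧ p.2 ≠ -1 then ts
      else ts ++ [(if p.2 = 1 then ['+'] else ['-']) ++
        pvBodyB iv iw ow ((csd.length : Int) - p.1 - 1)]) [] := by
  rw [PySem.List.enumerate_eq_map_pyRange (d := 0), List.foldl_map]
  have hlen : PySem.List.len csd = (csd.length : Int) := rfl
  rw [hlen]
  apply PySem.List.foldl_congr_mem
  intro ts i _
  dsimp only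
  by_cases h1 : PySem.List.pyGetD csd i 0 = 1
  · simp [h1, pvPlusTermA_eq]
  · by_cases h2 : PySem.List.pyGetD csd i 0 = -1
    · simp [h1, h2, pvMinusTermA_eq]
    · simp [h1, h2]

theorem termsB_mem (iv : List Char) (iw ow n : Int) (pr : List (Int × Int))
    (ts0 : List (List Char)) (h0 : ∀ x ∈ ts0, ∃ b, x = '+' :: b ∨ x = '-' :: b) :
    ∀ x ∈ pr.foldl (fun ts p =>
      if p.2 ≠ 1 ∧ p.2 ≠ -1 then ts
      else ts ++ [(if p.2 = 1 then ['+'] else ['-']) ++ pvBodyB iv iw ow (n - p.1 - 1)]) ts0,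
      ∃ b, x = '+' :: b ∨ x = '-' :: b := by
  induction pr generalizing ts0 with
  | nil => exact h0
  | cons p pr ih =>
    intro x hx
    rw [List.foldl_cons] at hx
    refine ih _ (fun y hy => ?_) x hx
    by_cases hc : p.2 ≠ 1 ∧ p.2 ≠ -1
    · rw [if_pos hc] at hy
      exact h0 y hy
    · rw [if_neg hc] at hy
      rcases List.mem_append.mp hy with hy | hy
      · exact h0 y hy
      · rw [List.mem_singleton] at hy
        subst hy
        by_cases h1 : p.2 = 1
        · exact ⟨pvBodyB iv iw ow (n - p.1 - 1), Or.inl (by simp [h1])⟩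
        · exact ⟨pvBodyB iv iw ow (n - p.1 - 1), Or.inr (by simp [h1])⟩

theorem join_cons_head (x : Char) (b : List Char) (rest : List (List Char)) :
    PySem.Chars.join [' '] ((x :: b) :: rest) = x :: PySem.Chars.join [' '] (b :: rest) := by
  cases rest with
  | nil => rw [PySem.Chars.join_singleton, PySem.Chars.join_singleton]
  | cons u r =>
    rw [PySem.Chars.join_cons_cons, PySem.Chars.join_cons_cons]
    simp

theorem startswith_append_left (p s q : List Char) :
    PySem.Chars.startswith (p ++ s) (p ++ q) = PySem.Chars.startswith s q := by
  rw [Bool.eq_iff_iff, PySem.Chars.startswith_iff, PySem.Chars.startswith_iff]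
  exact List.prefix_append_right_inj p

theorem find_of_prefix (s p : List Char) (h : p <+: s) : PySem.Chars.find s p = 0 := by
  have hnn : 0 ≤ PySem.Chars.find s p := (PySem.Chars.find_nonneg_iff s p).mpr h.isInfix
  have hspec := PySem.Chars.find_spec (s := s) (sub := p) hnn
  by_contra hne
  have hpos : 0 < (PySem.Chars.find s p).toNat := by omega
  have h0 := hspec.2 0 hpos
  rw [List.drop_zero] at h0
  exact h0 h

theorem assemble_nil (ov : List Char) :
    (if PySem.Chars.startswith
          ("assign ".toList ++ ov ++ " = ".toList ++ PySem.Chars.join [' '] [] ++ [';'])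
          ("assign ".toList ++ ov ++ " = +".toList) then
       pvReplaceOnce
         ("assign ".toList ++ ov ++ " = ".toList ++ PySem.Chars.join [' '] [] ++ [';'])
         ("assign ".toList ++ ov ++ " = +".toList)
         ("assign ".toList ++ ov ++ " = ".toList)
     else "assign ".toList ++ ov ++ " = ".toList ++ PySem.Chars.join [' '] [] ++ [';'])
    = "assign ".toList ++ ov ++ " = ".toList ++ PySem.Chars.join [' '] [] ++ [';'] := by
  have hsw : PySem.Chars.startswith
      ("assign ".toList ++ ov ++ " = ".toList ++ PySem.Chars.join [' '] [] ++ [';'])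
      ("assign ".toList ++ ov ++ " = +".toList) = false := by
    rw [PySem.Chars.join_nil,
      show " = +".toList = " = ".toList ++ ['+'] from by decide,
      show "assign ".toList ++ ov ++ (" = ".toList ++ ['+'])
          = ("assign ".toList ++ ov ++ " = ".toList) ++ ['+'] from by simp,
      show "assign ".toList ++ ov ++ " = ".toList ++ ([] : List Char) ++ [';']
          = ("assign ".toList ++ ov ++ " = ".toList) ++ [';'] from by simp,
      startswith_append_left]
    decide
  rw [hsw]
  simp

theorem assemble_plus (ov b : List Char) (rest : List (List Char)) :
    (if PySem.Chars.startswith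
          ("assign ".toList ++ ov ++ " = ".toList ++
            PySem.Chars.join [' '] (('+' :: b) :: rest) ++ [';'])
          ("assign ".toList ++ ov ++ " = +".toList) then
       pvReplaceOnce
         ("assign ".toList ++ ov ++ " = ".toList ++
           PySem.Chars.join [' '] (('+' :: b) :: rest) ++ [';'])
         ("assign ".toList ++ ov ++ " = +".toList)
         ("assign ".toList ++ ov ++ " = ".toList)
     else "assign ".toList ++ ov ++ " = ".toList ++
       PySem.Chars.join [' '] (('+' :: b) :: rest) ++ [';'])
    = "assign ".toList ++ ov ++ " = ".toList ++ PySem.Chars.join [' '] (b :: rest) ++ [';'] := by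
  have hpref : "assign ".toList ++ ov ++ " = +".toList
      = "assign ".toList ++ ov ++ " = ".toList ++ ['+'] := by
    rw [show " = +".toList = " = ".toList ++ ['+'] from by decide]
    simp
  have hgrp : "assign ".toList ++ ov ++ " = ".toList ++
        PySem.Chars.join [' '] (('+' :: b) :: rest) ++ [';']
      = ("assign ".toList ++ ov ++ " = ".toList ++ ['+'])
        ++ (PySem.Chars.join [' '] (b :: rest) ++ [';']) := by
    rw [join_cons_head]
    simp
  rw [hgrp, hpref]
  rw [if_pos ((PySem.Chars.startswith_iff _ _).mpr (List.prefix_append _ _))]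
  unfold pvReplaceOnce
  rw [find_of_prefix _ _ (List.prefix_append _ _)]
  norm_num
  rw [show "assign ".toList ++ (ov ++ (" = ".toList ++ '+' :: (PySem.Chars.join [' '] (b :: rest) ++ [';'])))
        = ("assign ".toList ++ ov ++ " = ".toList ++ ['+'])
          ++ (PySem.Chars.join [' '] (b :: rest) ++ [';']) from by simp,
    show "assign ".length + (ov.length + (" = ".length + 1))
        = ("assign ".toList ++ ov ++ " = ".toList ++ ['+']).length from by
      simp [show "assign ".length = 7 from rfl, show " = ".length = 3 from rfl]
      omega]
  exact List.drop_left

theorem assemble_minus (ov b : List Char) (rest : List (List Char)) :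
    (if PySem.Chars.startswith
          ("assign ".toList ++ ov ++ " = ".toList ++
            PySem.Chars.join [' '] (('-' :: b) :: rest) ++ [';'])
          ("assign ".toList ++ ov ++ " = +".toList) then
       pvReplaceOnce
         ("assign ".toList ++ ov ++ " = ".toList ++
           PySem.Chars.join [' '] (('-' :: b) :: rest) ++ [';'])
         ("assign ".toList ++ ov ++ " = +".toList)
         ("assign ".toList ++ ov ++ " = ".toList)
     else "assign ".toList ++ ov ++ " = ".toList ++
       PySem.Chars.join [' '] (('-' :: b) :: rest) ++ [';'])
    = "assign ".toList ++ ov ++ " = ".toList ++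
      PySem.Chars.join [' '] (('-' :: b) :: rest) ++ [';'] := by
  have hsw : PySem.Chars.startswith
      ("assign ".toList ++ ov ++ " = ".toList ++
        PySem.Chars.join [' '] (('-' :: b) :: rest) ++ [';'])
      ("assign ".toList ++ ov ++ " = +".toList) = false := by
    rw [join_cons_head,
      show " = +".toList = " = ".toList ++ ['+'] from by decide,
      show "assign ".toList ++ ov ++ (" = ".toList ++ ['+'])
          = ("assign ".toList ++ ov ++ " = ".toList) ++ ['+'] from by simp,
      show "assign ".toList ++ ov ++ " = ".toList ++
            ('-' :: PySem.Chars.join [' '] (b :: rest)) ++ [';']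
          = ("assign ".toList ++ ov ++ " = ".toList)
            ++ (('-' :: PySem.Chars.join [' '] (b :: rest)) ++ [';']) from by simp,
      startswith_append_left]
    rw [← Bool.not_eq_true, PySem.Chars.startswith_iff]
    rintro ⟨u, hu⟩
    simp at hu
  rw [hsw]
  simp

-- proof-side name for B's first-term patch (definitionally the inline match in the port)
def pvPatchHead (terms : List (List Char)) : List (List Char) :=
  match terms with
  | [] => []
  | t :: rest => if PySem.Chars.startswith t ['+'] then t.drop 1 :: rest else t :: rest

theorem assemble_all (ov : List Char) (terms : List (List Char))
    (hshape : ∀ x ∈ terms, ∃ b, x = '+' :: b ∨ x = '-' :: b) :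
    (if PySem.Chars.startswith
          ("assign ".toList ++ ov ++ " = ".toList ++ PySem.Chars.join [' '] terms ++ [';'])
          ("assign ".toList ++ ov ++ " = +".toList) then
       pvReplaceOnce
         ("assign ".toList ++ ov ++ " = ".toList ++ PySem.Chars.join [' '] terms ++ [';'])
         ("assign ".toList ++ ov ++ " = +".toList)
         ("assign ".toList ++ ov ++ " = ".toList)
     else "assign ".toList ++ ov ++ " = ".toList ++ PySem.Chars.join [' '] terms ++ [';'])
    = "assign ".toList ++ ov ++ " = ".toList ++
      PySem.Chars.join [' '] (pvPatchHead terms) ++ [';'] := by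
  cases terms with
  | nil => exact assemble_nil ov
  | cons t rest =>
    obtain ⟨b, hb | hb⟩ := hshape t (List.mem_cons_self ..)
    · subst hb
      have hsw : PySem.Chars.startswith ('+' :: b) ['+'] = true :=
        (PySem.Chars.startswith_iff _ _).mpr ⟨b, rfl⟩
      unfold pvPatchHead
      simp only [hsw, if_true, List.drop_succ_cons, List.drop_zero]
      exact assemble_plus ov b rest
    · subst hb
      have hsw : PySem.Chars.startswith ('-' :: b) ['+'] = false := by
        rw [← Bool.not_eq_true, PySem.Chars.startswith_iff]
        rintro ⟨u, hu⟩
        simp at hu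
      unfold pvPatchHead
      simp only [hsw, Bool.false_eq_true, if_false]
      exact assemble_minus ov b rest

-- ===== VERDICT (by name: the statement is the Claim_ definition above) =====
theorem generate_verilog_spec : Claim_equal_generate_verilog := by
  intro bs iv ov iw ow _ _
  unfold Spec_generate_verilog generate_verilog generate_verilog_alt
  dsimp only
  rw [foldl_addGroup_eq_rle, ← csdA_eq_emit]
  rw [terms_eq]
  rw [← apply_ite String.ofList]
  exact congrArg String.ofList (assemble_all ov.toList _
    (termsB_mem iv.toList iw ow _ _ [] (by simp)))
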